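-- pv_equiv track=rewrite | github.com/observeri5000/stress_classification_by_1dcnn | pre_processing.py | find_index_list
-- ===== SOURCE A (Python) =====
-- def find_index_list(data, data_len, data_height):
--     """
--     This function finds indexes where the label changes
--
--     Parameters:
--         data: timeseries data with corresponding labels
--         data_len: length of one row
--         data_height: number of rows
--     Returns:
--         List of indexes where the label changes
--     """
--
--     index_list = []
--
--     j = 1
--
--     while j < data_len:
--         if data[data_height - 1][j-1] != data[data_height - 1][j]:
--             index_list.append(j-1)
--         j += 1
--
--     return index_list
-- ===== SOURCE B (Python) =====
-- def find_index_list(data, data_len, data_height):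
--     """Run-length decomposition: RLE the labelled row, then the boundaries are
--     the cumulative run lengths (minus one) of every run except the last."""
--     if data_len <= 1:
--         return []
--     row = data[data_height - 1]
--     prefix = [row[j] for j in range(data_len)]
--     # run-length encode the prefix
--     runs = []
--     cur = 1
--     for a, b in zip(prefix, prefix[1:]):
--         if a == b:
--             cur += 1
--         else:
--             runs.append(cur)
--             cur = 1
--     runs.append(cur)
--     # each run except the last ends at a change point
--     result = []
--     pos = -1
--     for r in runs[:-1]:
--         pos += r
--         result.append(pos)
--     return result
-- ===== Notes on version B (the rewrite author's own statement) =====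
-- stated objective: alternative
-- what changed: Replaces the index-by-index while loop over the row with a run-length encoding of the row prefix followed by a cumulative-sum pass that emits the last index of every run but the final one.
import Mathlib
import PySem

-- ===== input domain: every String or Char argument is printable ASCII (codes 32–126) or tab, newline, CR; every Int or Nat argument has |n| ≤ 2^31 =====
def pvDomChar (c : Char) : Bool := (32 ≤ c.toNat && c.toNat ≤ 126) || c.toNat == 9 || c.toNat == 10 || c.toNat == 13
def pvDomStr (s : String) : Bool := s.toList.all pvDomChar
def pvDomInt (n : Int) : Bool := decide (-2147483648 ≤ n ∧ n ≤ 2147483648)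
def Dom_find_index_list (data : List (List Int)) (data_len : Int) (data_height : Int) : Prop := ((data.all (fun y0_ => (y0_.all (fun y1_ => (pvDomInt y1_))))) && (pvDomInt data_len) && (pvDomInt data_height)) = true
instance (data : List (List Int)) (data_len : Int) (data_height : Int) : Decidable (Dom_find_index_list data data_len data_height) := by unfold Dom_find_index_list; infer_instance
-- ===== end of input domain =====

-- B replaces A's index-by-index while loop with a run-length encoding of the row
-- prefix followed by a cumulative-sum pass (objective: alternative algorithm, same cost).


-- ===== PORT A =====
-- literal port of A: while j < data_len, compare data[data_height-1][j-1] with data[data_height-1][j]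
-- (pyGetD is exact under Pre_, which guarantees every index is in range whenever the loop runs)
def find_index_list (data : List (List Int)) (data_len : Int) (data_height : Int) : List Int :=
  (PySem.List.pyRange 1 data_len 1).foldl
    (fun acc j =>
      if PySem.List.pyGetD (PySem.List.pyGetD data (data_height - 1) []) (j - 1) 0
           ≠ PySem.List.pyGetD (PySem.List.pyGetD data (data_height - 1) []) j 0
      then acc ++ [j - 1] else acc)
    []

-- ===== PORT B =====
def find_index_list_alt (data : List (List Int)) (data_len : Int) (data_height : Int) : List Int :=
  if data_len ≤ 1 then []
  else
    let row := PySem.List.pyGetD data (data_height - 1) []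
    let pre := (PySem.List.pyRange 0 data_len 1).map (fun j => PySem.List.pyGetD row j 0)
    -- run-length encode the prefix
    let rc := (pre.zip pre.tail).foldl
      (fun (p : List Int × Int) (ab : Int × Int) =>
        if ab.1 = ab.2 then (p.1, p.2 + 1) else (p.1 ++ [p.2], 1)) ([], 1)
    let runs := rc.1 ++ [rc.2]
    -- each run except the last ends at a change point
    (runs.dropLast.foldl
      (fun (p : List Int × Int) (r : Int) => (p.1 ++ [p.2 + r], p.2 + r)) ([], -1)).1

-- ===== PRECONDITION & SPEC =====
-- Pre_ excludes exactly the inputs where A raises IndexError: when the loop runs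
-- (data_len > 1), data[data_height-1] must exist and hold at least data_len elements.
def Pre_find_index_list (data : List (List Int)) (data_len : Int) (data_height : Int) : Prop :=
  1 < data_len →
    (PySem.Raise.InRange data.length (data_height - 1) ∧
     data_len ≤ (PySem.List.pyGetD data (data_height - 1) []).length)
instance (data : List (List Int)) (data_len : Int) (data_height : Int) : Decidable (Pre_find_index_list data data_len data_height) := by unfold Pre_find_index_list; infer_instance

def pvWitness_find_index_list : List (List Int) × Int × Int := ([[1, 1, 2, 2, 3]], 5, 1)

def Spec_find_index_list (data : List (List Int)) (data_len : Int) (data_height : Int) (out : List Int) : Prop := out = find_index_list_alt data data_len data_height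
instance (data : List (List Int)) (data_len : Int) (data_height : Int) (out : List Int) : Decidable (Spec_find_index_list data data_len data_height out) := by unfold Spec_find_index_list; infer_instance

-- ===== CLAIM (what is proved, stated in full; the proofs are below) =====
def Claim_equal_find_index_list : Prop := ∀ (data : List (List Int)) (data_len : Int) (data_height : Int), Dom_find_index_list data data_len data_height → Pre_find_index_list data data_len data_height → Spec_find_index_list data data_len data_height (find_index_list data data_len data_height)

-- ===== LEMMAS AND PROOFS =====

-- reference function: change indices of a list, first element carrying index i
def chg : List Int → Int → List Int
  | x :: y :: t, i => (if x = y then [] else [i]) ++ chg (y :: t) (i + 1)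
  | _, _ => []

theorem chg_snoc (x : Int) (xs : List Int) (y i : Int) :
    chg ((x :: xs) ++ [y]) i =
      chg (x :: xs) i ++
        (if (x :: xs).getLast (by simp) = y then [] else [i + (xs.length : Int)]) := by
  induction xs generalizing x i with
  | nil =>
    simp only [List.cons_append, List.nil_append, chg, List.getLast_singleton,
      List.length_nil, Int.natCast_zero, add_zero, List.append_nil]
  | cons z t ih =>
    have hrec := ih z (i + 1)
    simp only [List.cons_append] at hrec ⊢
    simp only [chg, hrec, List.getLast_cons (List.cons_ne_nil z t), List.length_cons]
    have harith : i + 1 + (t.length : Int) = i + ((t.length : Int) + 1) := by ring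
    rcases eq_or_ne x z with hxz | hxz <;>
      rcases eq_or_ne ((z :: t).getLast (List.cons_ne_nil z t)) y with h2 | h2 <;>
        simp [hxz, h2, harith]

-- pure run-length encoder matching B's first fold
def runsRec : List Int → Int → List Int × Int
  | x :: y :: t, c => if x = y then runsRec (y :: t) (c + 1)
                      else ((c :: (runsRec (y :: t) 1).1), (runsRec (y :: t) 1).2)
  | _, c => ([], c)

-- pure cumulative-sum matching B's second fold
def cum : List Int → Int → List Int
  | [], _ => []
  | r :: t, p => (p + r) :: cum t (p + r)

theorem foldl_rle_acc (ps : List (Int × Int)) (rs : List Int) (c : Int) :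
    ps.foldl (fun (p : List Int × Int) (ab : Int × Int) =>
      if ab.1 = ab.2 then (p.1, p.2 + 1) else (p.1 ++ [p.2], 1)) (rs, c)
    = (rs ++ (ps.foldl (fun (p : List Int × Int) (ab : Int × Int) =>
        if ab.1 = ab.2 then (p.1, p.2 + 1) else (p.1 ++ [p.2], 1)) ([], c)).1,
       (ps.foldl (fun (p : List Int × Int) (ab : Int × Int) =>
        if ab.1 = ab.2 then (p.1, p.2 + 1) else (p.1 ++ [p.2], 1)) ([], c)).2) := by
  induction ps generalizing rs c with
  | nil => simp
  | cons ab ps ih =>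
    by_cases h : ab.1 = ab.2
    · simp only [List.foldl_cons, if_pos h]
      rw [ih]
    · simp only [List.foldl_cons, if_neg h, List.nil_append]
      rw [ih (rs ++ [c]) 1, ih [c] 1]
      simp [List.append_assoc]

theorem foldl_rle_eq_runsRec (L : List Int) (c : Int) :
    (L.zip L.tail).foldl (fun (p : List Int × Int) (ab : Int × Int) =>
      if ab.1 = ab.2 then (p.1, p.2 + 1) else (p.1 ++ [p.2], 1)) ([], c)
    = runsRec L c := by
  induction L generalizing c with
  | nil => simp [runsRec]
  | cons x xs ih =>
    cases xs with
    | nil => simp [runsRec]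
    | cons y t =>
      have hzip : (x :: y :: t).zip (x :: y :: t).tail
          = (x, y) :: ((y :: t).zip (y :: t).tail) := by
        simp [List.zip]
      rw [hzip, List.foldl_cons]
      by_cases h : x = y
      · simp only [runsRec, h, if_true]
        exact ih (c + 1)
      · simp only [runsRec, if_neg h, List.nil_append]
        rw [foldl_rle_acc, ih 1]
        simp

theorem foldl_cum_acc (rs : List Int) (out : List Int) (p : Int) :
    (rs.foldl (fun (q : List Int × Int) (r : Int) => (q.1 ++ [q.2 + r], q.2 + r)) (out, p)).1
    = out ++ cum rs p := by
  induction rs generalizing out p with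
  | nil => simp [cum]
  | cons r t ih => simp [cum, ih]

theorem cum_runsRec (L : List Int) (c p : Int) :
    cum (runsRec L c).1 p = chg L (p + c) := by
  induction L generalizing c p with
  | nil => simp [runsRec, cum, chg]
  | cons x xs ih =>
    cases xs with
    | nil => simp [runsRec, cum, chg]
    | cons y t =>
      by_cases h : x = y
      · simp only [runsRec, chg, if_pos h, List.nil_append]
        rw [ih (c + 1) p, add_assoc]
      · simp only [runsRec, chg, if_neg h, cum]
        rw [ih 1 (p + c)]
        simp

-- B's pure core (RLE then cumulative sums) computes the change indices
theorem rle_cum_eq_chg (L : List Int) :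
    (((runsRec L 1).1 ++ [(runsRec L 1).2]).dropLast.foldl
      (fun (q : List Int × Int) (r : Int) => (q.1 ++ [q.2 + r], q.2 + r)) ([], -1)).1
    = chg L 0 := by
  rw [List.dropLast_concat, foldl_cum_acc, List.nil_append, cum_runsRec]
  norm_num

-- A's fold over range(1, m) equals chg of the first m elements of the row
theorem A_fold_eq_chg (row : List Int) (m : Nat) (hm : m ≤ row.length) :
    (PySem.List.pyRange 1 (m : Int) 1).foldl
      (fun acc j => if PySem.List.pyGetD row (j - 1) 0 ≠ PySem.List.pyGetD row j 0
                    then acc ++ [j - 1] else acc) []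
    = chg (row.take m) 0 := by
  induction m with
  | zero => simp [PySem.List.pyRange_one_eq_nil, chg]
  | succ m ih =>
    cases Nat.eq_zero_or_pos m with
    | inl h0 =>
      subst h0
      rw [PySem.List.pyRange_one_eq_nil (by norm_num)]
      cases row with
      | nil => simp at hm
      | cons a t => simp [chg]
    | inr hpos =>
      have hm' : m ≤ row.length := Nat.le_of_succ_le hm
      have hmlt : m < row.length := hm
      rw [show ((m + 1 : Nat) : Int) = (m : Int) + 1 by push_cast; ring,
        PySem.List.pyRange_one_succ_right (by exact_mod_cast hpos),
        List.foldl_append, ih hm']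
      have htake : row.take (m + 1) = row.take m ++ [row[m]] := by
        rw [← List.take_concat_get hmlt, List.concat_eq_append]
      have hlen : (row.take m).length = m := by
        simp [List.length_take, Nat.min_eq_left hm']
      obtain ⟨x, xs, hx⟩ : ∃ x xs, row.take m = x :: xs := by
        cases hrt : row.take m with
        | nil => rw [hrt] at hlen; simp at hlen; omega
        | cons x xs => exact ⟨x, xs, rfl⟩
      have hlast : (row.take m).getLast (by rw [hx]; simp) = row[m - 1] := by
        rw [List.getLast_eq_getElem, List.getElem_take]
        congr 1
        omega
      have hg1 : PySem.List.pyGetD row ((m : Int) - 1) 0 = row[m - 1] := by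
        rw [show ((m : Int) - 1) = ((m - 1 : Nat) : Int) by omega,
          PySem.List.pyGetD_natCast]
        exact List.getD_eq_getElem row 0 (by omega)
      have hg2 : PySem.List.pyGetD row (m : Int) 0 = row[m] := by
        rw [PySem.List.pyGetD_natCast]
        exact List.getD_eq_getElem row 0 hmlt
      rw [htake, hx, chg_snoc]
      rw [show (x :: xs).getLast (by simp) = row[m - 1] by rw [← hlast]; congr 1; rw [hx]]
      simp only [List.foldl_cons, List.foldl_nil, hg1, hg2, ← hx]
      have hxl : (xs.length : Int) = (m : Int) - 1 := by
        have : (x :: xs).length = m := by rw [← hx]; exact hlen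
        simp at this
        omega
      rcases eq_or_ne (row[m - 1]) (row[m]) with he | he
      · simp [he]
      · simp only [he, if_false, ne_eq, not_false_eq_true, if_true, hxl]
        ring_nf

-- B's prefix list is row.take n
theorem B_prefix_eq_take (row : List Int) (n : Nat) (hn : n ≤ row.length) :
    (PySem.List.pyRange 0 (n : Int) 1).map (fun j => PySem.List.pyGetD row j 0)
    = row.take n := by
  apply List.ext_getElem
  · simp [PySem.List.length_pyRange_one, List.length_take, Nat.min_eq_left hn]
  · intro k h1 h2
    have hk : k < n := by
      simpa [PySem.List.length_pyRange_one] using h1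
    rw [List.getElem_map, PySem.List.getElem_pyRange_one, List.getElem_take]
    rw [show ((0 : Int) + (k : Int)) = ((k : Nat) : Int) by omega,
      PySem.List.pyGetD_natCast]
    exact List.getD_eq_getElem row 0 (by omega)

-- ===== VERDICT (by name: the statement is the Claim_ definition above) =====
theorem find_index_list_spec : Claim_equal_find_index_list := by
  intro data dl dh _ hpre
  unfold Spec_find_index_list find_index_list find_index_list_alt
  by_cases h1 : 1 < dl
  · obtain ⟨-, hlen⟩ := hpre h1
    rw [if_neg (by omega)]
    set row := PySem.List.pyGetD data (dh - 1) [] with hrow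
    set n := dl.toNat with hn
    have hdl : dl = (n : Int) := by omega
    have hnle : n ≤ row.length := by omega
    rw [hdl, A_fold_eq_chg row n hnle]
    simp only [B_prefix_eq_take row n hnle]
    rw [foldl_rle_eq_runsRec, rle_cum_eq_chg]
  · have hle : dl ≤ 1 := by omega
    rw [if_pos hle, PySem.List.pyRange_one_eq_nil hle, List.foldl_nil]
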